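-- pv_equiv track=rewrite | github.com/zhenye0616/HDEvent-Net | scripts/export_embeddings.py | choose_split
-- ===== SOURCE A (Python) =====
-- from typing import Dict, Iterable, List, Optional, Sequence, Tuple
--
-- def choose_split(splits: Sequence[str]) -> str:
-- 	if not splits:
-- 		return "unknown"
-- 	priority = ("val", "test", "train")
-- 	for key in priority:
-- 		if key in splits:
-- 			return key
-- 	return sorted(splits)[0]
-- ===== SOURCE B (Python) =====
-- def choose_split(splits):
--     if not splits:
--         return "unknown"
--     priority = ("val", "test", "train")
--     def rank(s):
--         return (priority.index(s) if s in priority else len(priority), s)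
--     return min(splits, key=rank)
-- ===== Notes on version B (the rewrite author's own statement) =====
-- stated objective: idiomatic
-- what changed: Replaces the priority loop over membership tests plus a full sort with a single min() over a lexicographic ranking key (priority index, then name), so the list is scanned once instead of being scanned per priority key and then sorted.
import Mathlib
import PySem

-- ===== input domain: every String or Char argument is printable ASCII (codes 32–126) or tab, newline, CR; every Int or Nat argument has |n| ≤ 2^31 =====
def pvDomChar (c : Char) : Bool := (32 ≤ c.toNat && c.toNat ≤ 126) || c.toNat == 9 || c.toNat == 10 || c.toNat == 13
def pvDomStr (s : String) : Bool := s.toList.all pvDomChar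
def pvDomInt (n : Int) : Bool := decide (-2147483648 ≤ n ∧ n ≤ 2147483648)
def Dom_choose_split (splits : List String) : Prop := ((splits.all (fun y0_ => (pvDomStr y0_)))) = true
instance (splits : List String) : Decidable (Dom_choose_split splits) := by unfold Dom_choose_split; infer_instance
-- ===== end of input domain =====

-- B replaces A's priority loop + full sort by a single min() with a (priority-rank, name) key; idiomatic, one pass.


-- ===== PORT A =====
-- for key in priority: if key in splits: return key   (early-return loop over the priority tuple)
def pvFindPriority (splits : List String) : List String → Option String
  | [] => none
  | k :: ks => if splits.contains k then some k else pvFindPriority splits ks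

def choose_split (splits : List String) : String :=
  if splits.isEmpty then "unknown"
  else
    match pvFindPriority splits ["val", "test", "train"] with
    | some k => k
    | none => PySem.List.pyGetD (PySem.List.sorted splits (fun x => x) false) 0 ""

-- ===== PORT B =====
-- rank(s) = (priority.index(s) if s in priority else len(priority), s); min(splits, key=rank)
def pvRankIdx (s : String) : Int :=
  if (["val", "test", "train"] : List String).contains s then
    ((PySem.List.index? ["val", "test", "train"] s).getD 0 : Nat)
  else 3

def choose_split_alt (splits : List String) : String :=
  if splits.isEmpty then "unknown"
  else
    match PySem.List.min2? splits pvRankIdx (fun s => s) with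
    | some m => m
    | none => "unknown"

-- ===== PRECONDITION & SPEC =====
def Spec_choose_split (splits : List String) (out : String) : Prop := out = choose_split_alt splits
instance (splits : List String) (out : String) : Decidable (Spec_choose_split splits out) := by unfold Spec_choose_split; infer_instance

-- ===== CLAIM (what is proved, stated in full; the proofs are below) =====
def Claim_equal_choose_split : Prop := ∀ (splits : List String), Dom_choose_split splits → Spec_choose_split splits (choose_split splits)

-- ===== LEMMAS AND PROOFS =====

/-- The lexicographic "≤" of B's ranking key (priority rank, then the name itself). -/
def pvKeyLe (a b : String) : Prop :=
  pvRankIdx a < pvRankIdx b ∨ (pvRankIdx a = pvRankIdx b ∧ a ≤ b)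

/-- The boolean comparison `min2?`'s fold step performs (definitionally its `if` condition). -/
def pvCondB (x m : String) : Bool :=
  decide (pvRankIdx x < pvRankIdx m) ||
    (!decide (pvRankIdx m < pvRankIdx x) && decide ((fun s => s) x < (fun s => s) m))

/-- `min2?`'s fold step, specialised to B's keys (definitionally the lambda inside `min2?`). -/
def pvStep (acc : Option String) (x : String) : Option String :=
  match acc with
  | none => some x
  | some m => if pvCondB x m = true then some x else some m

theorem pvRank_val : pvRankIdx "val" = 0 := by decide
theorem pvRank_test : pvRankIdx "test" = 1 := by decide
theorem pvRank_train : pvRankIdx "train" = 2 := by decide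

theorem pvRank_other (s : String) (h1 : s ≠ "val") (h2 : s ≠ "test") (h3 : s ≠ "train") :
    pvRankIdx s = 3 := by
  simp [pvRankIdx, h1, h2, h3]

theorem pvRank_cases (s : String) :
    s = "val" ∨ s = "test" ∨ s = "train" ∨ pvRankIdx s = 3 := by
  by_cases h1 : s = "val"
  · exact Or.inl h1
  by_cases h2 : s = "test"
  · exact Or.inr (Or.inl h2)
  by_cases h3 : s = "train"
  · exact Or.inr (Or.inr (Or.inl h3))
  exact Or.inr (Or.inr (Or.inr (pvRank_other s h1 h2 h3)))

theorem pvKeyLe_refl (a : String) : pvKeyLe a a := Or.inr ⟨rfl, le_refl a⟩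

theorem pvKeyLe_antisymm {a b : String} (h1 : pvKeyLe a b) (h2 : pvKeyLe b a) : a = b := by
  rcases h1 with h1 | ⟨e1, l1⟩ <;> rcases h2 with h2 | ⟨e2, l2⟩
  · omega
  · omega
  · omega
  · exact le_antisymm l1 l2

theorem pvKeyLe_trans {a b c : String} (h1 : pvKeyLe a b) (h2 : pvKeyLe b c) : pvKeyLe a c := by
  rcases h1 with h1 | ⟨e1, l1⟩ <;> rcases h2 with h2 | ⟨e2, l2⟩
  · exact Or.inl (by omega)
  · exact Or.inl (by omega)
  · exact Or.inl (by omega)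
  · exact Or.inr ⟨by omega, le_trans l1 l2⟩

theorem pvCond_iff (x m : String) :
    pvCondB x m = true ↔
      (pvRankIdx x < pvRankIdx m ∨ (pvRankIdx x = pvRankIdx m ∧ x < m)) := by
  simp only [pvCondB, Bool.or_eq_true, Bool.and_eq_true, Bool.not_eq_true', decide_eq_true_eq,
    decide_eq_false_iff_not]
  constructor
  · rintro (h | ⟨h1, h2⟩)
    · exact Or.inl h
    · by_cases h3 : pvRankIdx x < pvRankIdx m
      · exact Or.inl h3
      · exact Or.inr ⟨by omega, h2⟩
  · rintro (h | ⟨h1, h2⟩)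
    · exact Or.inl h
    · exact Or.inr ⟨by omega, h2⟩

/-- Invariant of `min2?`'s fold: the accumulator ends as a key-minimum of everything seen. -/
theorem pvFold_min (t : List String) : ∀ (m0 : String), ∃ m,
    t.foldl pvStep (some m0) = some m ∧
    (m = m0 ∨ m ∈ t) ∧ pvKeyLe m m0 ∧ ∀ s ∈ t, pvKeyLe m s := by
  induction t with
  | nil => exact fun m0 => ⟨m0, rfl, Or.inl rfl, pvKeyLe_refl m0, by simp⟩
  | cons x t ih =>
    intro m0
    by_cases hc : pvCondB x m0 = true
    · obtain ⟨m, hfold, hmem, hle, hall⟩ := ih x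
      have hr : pvStep (some m0) x = some x :=
        show (if pvCondB x m0 = true then some x else some m0) = some x from if_pos hc
      refine ⟨m, ?_, ?_, ?_, ?_⟩
      · simp only [List.foldl_cons, hr]; exact hfold
      · rcases hmem with h | h
        · exact Or.inr (by simp [h])
        · exact Or.inr (by simp [h])
      · have hx : pvKeyLe x m0 := by
          rcases (pvCond_iff x m0).mp hc with h | ⟨h1, h2⟩
          · exact Or.inl h
          · exact Or.inr ⟨h1, le_of_lt h2⟩
        exact pvKeyLe_trans hle hx
      · intro s hs
        rcases List.mem_cons.mp hs with h | h
        · exact h ▸ hle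
        · exact hall s h
    · obtain ⟨m, hfold, hmem, hle, hall⟩ := ih m0
      have hr : pvStep (some m0) x = some m0 :=
        show (if pvCondB x m0 = true then some x else some m0) = some m0 from if_neg hc
      have hnc : ¬ (pvRankIdx x < pvRankIdx m0 ∨ (pvRankIdx x = pvRankIdx m0 ∧ x < m0)) :=
        fun h => hc ((pvCond_iff x m0).mpr h)
      refine ⟨m, ?_, ?_, hle, ?_⟩
      · simp only [List.foldl_cons, hr]; exact hfold
      · rcases hmem with h | h
        · exact Or.inl h
        · exact Or.inr (by simp [h])
      · intro s hs
        rcases List.mem_cons.mp hs with h | h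
        · subst h
          have hx : pvKeyLe m0 s := by
            rcases lt_trichotomy (pvRankIdx m0) (pvRankIdx s) with h1 | h1 | h1
            · exact Or.inl h1
            · have h2 : ¬ s < m0 := fun hl => hnc (Or.inr ⟨h1.symm, hl⟩)
              exact Or.inr ⟨h1, not_lt.mp h2⟩
            · exact absurd (Or.inl h1) hnc
          exact pvKeyLe_trans hle hx
        · exact hall s h

/-- B's result on a nonempty list is a key-minimum member. -/
theorem pvAlt_spec (x : String) (t : List String) :
    choose_split_alt (x :: t) ∈ x :: t ∧ ∀ s ∈ x :: t, pvKeyLe (choose_split_alt (x :: t)) s := by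
  obtain ⟨m, hfold, hmem, hle, hall⟩ := pvFold_min t x
  have hcons : PySem.List.min2? (x :: t) pvRankIdx (fun s => s) = t.foldl pvStep (some x) := by
    unfold PySem.List.min2?
    simp only [List.foldl_cons]
    exact PySem.List.foldl_congr_mem _ _ _ _ (fun acc y _ => by cases acc <;> rfl)
  have hmin : PySem.List.min2? (x :: t) pvRankIdx (fun s => s) = some m := by
    rw [hcons]; exact hfold
  have hres : choose_split_alt (x :: t) = m := by
    simp [choose_split_alt, hmin]
  rw [hres]
  refine ⟨?_, ?_⟩
  · rcases hmem with h | h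
    · simp [h]
    · simp [h]
  · intro s hs
    rcases List.mem_cons.mp hs with h | h
    · exact h ▸ hle
    · exact hall s h

theorem pvRank_eq_zero {s : String} (h : pvRankIdx s = 0) : s = "val" := by
  rcases pvRank_cases s with h1 | h1 | h1 | h1
  · exact h1
  · rw [h1, pvRank_test] at h; omega
  · rw [h1, pvRank_train] at h; omega
  · omega

theorem pvRank_eq_one {s : String} (h : pvRankIdx s = 1) : s = "test" := by
  rcases pvRank_cases s with h1 | h1 | h1 | h1
  · rw [h1, pvRank_val] at h; omega
  · exact h1
  · rw [h1, pvRank_train] at h; omega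
  · omega

theorem pvRank_eq_two {s : String} (h : pvRankIdx s = 2) : s = "train" := by
  rcases pvRank_cases s with h1 | h1 | h1 | h1
  · rw [h1, pvRank_val] at h; omega
  · rw [h1, pvRank_test] at h; omega
  · exact h1
  · omega

theorem pvRank_nonneg (s : String) : 0 ≤ pvRankIdx s := by
  rcases pvRank_cases s with h | h | h | h
  · rw [h, pvRank_val]
  · rw [h, pvRank_test]; omega
  · rw [h, pvRank_train]; omega
  · omega

/-- A's result on a nonempty list is a key-minimum member. -/
theorem pvA_spec (splits : List String) (hne : splits ≠ []) :
    choose_split splits ∈ splits ∧ ∀ s ∈ splits, pvKeyLe (choose_split splits) s := by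
  have hemp : splits.isEmpty = false := by
    cases splits with
    | nil => exact absurd rfl hne
    | cons a b => rfl
  by_cases hv : "val" ∈ splits
  · have hres : choose_split splits = "val" := by
      simp [choose_split, hemp, pvFindPriority, List.contains_eq_mem, hv]
    rw [hres]
    refine ⟨hv, fun s _ => ?_⟩
    rw [pvKeyLe, pvRank_val]
    rcases lt_or_eq_of_le (pvRank_nonneg s) with h | h
    · exact Or.inl h
    · exact Or.inr ⟨h, le_of_eq (pvRank_eq_zero h.symm).symm⟩
  by_cases ht : "test" ∈ splits
  · have hres : choose_split splits = "test" := by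
      simp [choose_split, hemp, pvFindPriority, List.contains_eq_mem, hv, ht]
    rw [hres]
    refine ⟨ht, fun s hs => ?_⟩
    have hs0 : pvRankIdx s ≠ 0 := fun h => hv (pvRank_eq_zero h ▸ hs)
    rw [pvKeyLe, pvRank_test]
    have hnn := pvRank_nonneg s
    rcases lt_trichotomy 1 (pvRankIdx s) with h | h | h
    · exact Or.inl h
    · exact Or.inr ⟨h, le_of_eq (pvRank_eq_one h.symm).symm⟩
    · omega
  by_cases htr : "train" ∈ splits
  · have hres : choose_split splits = "train" := by
      simp [choose_split, hemp, pvFindPriority, List.contains_eq_mem, hv, ht, htr]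
    rw [hres]
    refine ⟨htr, fun s hs => ?_⟩
    have hs0 : pvRankIdx s ≠ 0 := fun h => hv (pvRank_eq_zero h ▸ hs)
    have hs1 : pvRankIdx s ≠ 1 := fun h => ht (pvRank_eq_one h ▸ hs)
    rw [pvKeyLe, pvRank_train]
    have hnn := pvRank_nonneg s
    rcases lt_trichotomy 2 (pvRankIdx s) with h | h | h
    · exact Or.inl h
    · exact Or.inr ⟨h, le_of_eq (pvRank_eq_two h.symm).symm⟩
    · omega
  · -- none of the priority names is present: A returns sorted(splits)[0]
    have hsne : PySem.List.sorted splits (fun x => x) false ≠ [] := by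
      simpa [PySem.List.sorted_eq_nil_iff] using hne
    obtain ⟨m, tl, hsorted⟩ := List.exists_cons_of_ne_nil hsne
    have hres : choose_split splits =
        PySem.List.pyGetD (PySem.List.sorted splits (fun x => x) false) 0 "" := by
      simp [choose_split, hemp, pvFindPriority, List.contains_eq_mem, hv, ht, htr]
    have hres2 : choose_split splits = m := by
      rw [hres, hsorted, PySem.List.pyGetD_zero_cons]
    rw [hres2]
    have hmmem : m ∈ splits := by
      have hm : m ∈ PySem.List.sorted splits (fun x => x) false := by simp [hsorted]
      exact (PySem.List.mem_sorted splits (fun x => x) false m).mp hm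
    refine ⟨hmmem, fun s hs => ?_⟩
    have hm3 : pvRankIdx m = 3 :=
      pvRank_other m (fun h => hv (h ▸ hmmem)) (fun h => ht (h ▸ hmmem)) (fun h => htr (h ▸ hmmem))
    have hs3 : pvRankIdx s = 3 :=
      pvRank_other s (fun h => hv (h ▸ hs)) (fun h => ht (h ▸ hs)) (fun h => htr (h ▸ hs))
    exact Or.inr ⟨by omega, PySem.List.key_head_sorted_le splits (fun x => x) hsorted s hs⟩

-- ===== VERDICT (by name: the statement is the Claim_ definition above) =====
theorem choose_split_spec : Claim_equal_choose_split := by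
  intro splits _
  unfold Spec_choose_split
  match splits with
  | [] => rfl
  | x :: t =>
    obtain ⟨hamem, hamin⟩ := pvA_spec (x :: t) (by simp)
    obtain ⟨hbmem, hbmin⟩ := pvAlt_spec x t
    exact pvKeyLe_antisymm (hamin _ hbmem) (hbmin _ hamem)
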